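-- pv_equiv track=rewrite | github.com/ccarmonar/memoria_utfsm_sparql | scripts/feature_extraction_script/functions/main.py | GroupOperators
-- ===== SOURCE A (Python) =====
-- def GroupOperators(profile_sparql, profile_low_explain):
-- 	extract_sparql_profile = profile_sparql
-- 	extract_sparql_profile = extract_sparql_profile.split("\n")
-- 	c = 0
-- 	operators = {}
-- 	for i in range(0,len(extract_sparql_profile)):
-- 		x = extract_sparql_profile[i]
-- 		if x != "" and all(element in x for element in ["time", "fanout", "input", "rows"]):
-- 			c = c + 1
-- 		OP = "OP"+str(c)
-- 		if OP not in operators: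
-- 			operators[OP] = {'profile_text': x,'profile_text_low_explain': ''}
-- 		else:
-- 			operators[OP]['profile_text'] = operators[OP]['profile_text'] + '\n' + x
--
-- 	extract_low_explain = profile_low_explain
-- 	extract_low_explain = extract_low_explain.split("\n")
-- 	c = 0
-- 	for i in range(0, len(extract_low_explain)):
-- 		x = extract_low_explain[i]
-- 		if x != "" and all(element in x for element in ["time", "fanout", "input", "rows"]):
-- 			c = c + 1
-- 		OP = "OP" + str(c)
-- 		operators[OP]['profile_text_low_explain'] = operators[OP]['profile_text_low_explain'] + '\n' + x
-- 	return operators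
-- ===== SOURCE B (Python) =====
-- def _partition(text):
--     """Split text's lines into consecutive groups: a new group starts at each
--     nonempty line containing all of 'time','fanout','input','rows'.
--     groups[0] is the (possibly empty) preamble before the first operator line."""
--     groups = []
--     cur = []
--     for line in text.split("\n"):
--         if line and all(w in line for w in ("time", "fanout", "input", "rows")):
--             groups.append(cur)
--             cur = [line]
--         else:
--             cur.append(line)
--     groups.append(cur)
--     return groups
--
--
-- def GroupOperators(profile_sparql, profile_low_explain):
--     operators = {}
--     for i, g in enumerate(_partition(profile_sparql)):
--         if i == 0 and not g:
--             continue
--         operators["OP" + str(i)] = {"profile_text": "\n".join(g),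
--                                     "profile_text_low_explain": ""}
--     for i, g in enumerate(_partition(profile_low_explain)):
--         if i == 0 and not g:
--             continue
--         operators["OP" + str(i)]["profile_text_low_explain"] = "\n" + "\n".join(g)
--     return operators
-- ===== Notes on version B (the rewrite author's own statement) =====
-- stated objective: alternative
-- what changed: B first partitions each text's lines into consecutive operator groups (a helper scanning the lines once), then builds each dict entry from a whole group at once with '\n'.join, instead of A's single pass that threads an operator counter and mutates dict entries line by line by string concatenation.
-- outside the precondition, e.g. on GroupOperators('a', 'time fanout input rows'): A raises KeyError, B raises KeyError
import Mathlib
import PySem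

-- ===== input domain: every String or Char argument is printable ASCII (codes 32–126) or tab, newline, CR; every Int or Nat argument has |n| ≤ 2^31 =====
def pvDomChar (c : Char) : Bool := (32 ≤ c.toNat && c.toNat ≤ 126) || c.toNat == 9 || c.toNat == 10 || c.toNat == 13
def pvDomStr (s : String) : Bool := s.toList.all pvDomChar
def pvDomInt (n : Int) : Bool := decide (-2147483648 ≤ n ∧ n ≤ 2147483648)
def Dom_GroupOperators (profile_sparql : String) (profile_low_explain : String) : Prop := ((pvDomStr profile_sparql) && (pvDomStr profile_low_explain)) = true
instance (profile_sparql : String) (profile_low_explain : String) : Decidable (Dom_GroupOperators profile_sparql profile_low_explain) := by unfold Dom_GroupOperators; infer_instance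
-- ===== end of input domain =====

-- B re-implements A by partitioning each text's lines into consecutive operator groups and
-- building each dict entry from a whole group at once (join), instead of A's single pass that
-- mutates dict entries line by line; equal output wherever Python A returns (Pre_ excludes KeyError).

-- ===== PORT A =====
-- the loop bodies of A's two for-loops, extracted verbatim as named step functions
def pvStepA1 (s : Int × PySem.Dict String (PySem.Dict String String)) (x : String) :
    Int × PySem.Dict String (PySem.Dict String String) :=
  let c := if ((!(x == "")) && (["time", "fanout", "input", "rows"].all fun element => PySem.Str.isIn element x)) = true
           then s.1 + 1 else s.1
  let OP := "OP" ++ PySem.Int.toStr c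
  let d := if s.2.contains OP = false then
      s.2.insert OP (PySem.Dict.ofList [("profile_text", x), ("profile_text_low_explain", "")])
    else
      -- operators[OP]['profile_text'] = operators[OP]['profile_text'] + '\n' + x ; the key is present in this branch,
      -- so modify with the unreachable default Dict.empty / "" is exact
      s.2.modify OP PySem.Dict.empty
        (fun inner => inner.insert "profile_text" (inner.getD "profile_text" "" ++ "\n" ++ x))
  (c, d)

def pvStepA2 (s : Int × PySem.Dict String (PySem.Dict String String)) (x : String) :
    Int × PySem.Dict String (PySem.Dict String String) :=
  let c := if ((!(x == "")) && (["time", "fanout", "input", "rows"].all fun element => PySem.Str.isIn element x)) = true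
           then s.1 + 1 else s.1
  let OP := "OP" ++ PySem.Int.toStr c
  -- operators[OP]['profile_text_low_explain'] += '\n' + x ; Python raises KeyError when OP is absent —
  -- exactly those inputs are excluded by Pre_GroupOperators, so the modify default is unreachable there
  (c, s.2.modify OP PySem.Dict.empty
        (fun inner => inner.insert "profile_text_low_explain" (inner.getD "profile_text_low_explain" "" ++ "\n" ++ x)))

def GroupOperators (profile_sparql : String) (profile_low_explain : String) :
    List (String × List (String × String)) :=
  -- split("\n"): the separator is the nonempty literal "\n", so split? is always some — getD [] is exact
  let extract_sparql_profile := (PySem.Str.split? profile_sparql "\n").getD []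
  let r1 := (PySem.List.pyRange 0 (PySem.List.len extract_sparql_profile)).foldl
      (fun s i => pvStepA1 s (PySem.List.pyGetD extract_sparql_profile i "")) (0, PySem.Dict.empty)
  let extract_low_explain := (PySem.Str.split? profile_low_explain "\n").getD []
  let r2 := (PySem.List.pyRange 0 (PySem.List.len extract_low_explain)).foldl
      (fun s i => pvStepA2 s (PySem.List.pyGetD extract_low_explain i "")) (0, r1.2)
  r2.2.items.map (fun p => (p.1, p.2.items))

-- ===== PORT B =====
-- Source B's loop bodies, extracted verbatim as named step functions
def pvPartStep (s : List (List String) × List String) (line : String) :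
    List (List String) × List String :=
  if ((!(line == "")) && (["time", "fanout", "input", "rows"].all fun w => PySem.Str.isIn w line)) = true
  then (s.1 ++ [s.2], [line])
  else (s.1, s.2 ++ [line])

-- Source B's helper _partition: one fold over the lines keeping (closed groups, current group)
def pvPartition (text : String) : List (List String) :=
  let s := ((PySem.Str.split? text "\n").getD []).foldl pvPartStep ([], [])
  s.1 ++ [s.2]

def pvStepB1 (d : PySem.Dict String (PySem.Dict String String)) (gi : Int × List String) :
    PySem.Dict String (PySem.Dict String String) :=
  if gi.1 = 0 ∧ gi.2 = [] then d
  else d.insert ("OP" ++ PySem.Int.toStr gi.1)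
    (PySem.Dict.ofList [("profile_text", PySem.Str.join "\n" gi.2), ("profile_text_low_explain", "")])

def pvStepB2 (d : PySem.Dict String (PySem.Dict String String)) (gi : Int × List String) :
    PySem.Dict String (PySem.Dict String String) :=
  if gi.1 = 0 ∧ gi.2 = [] then d
  else
    -- operators[key]["profile_text_low_explain"] = '\n' + '\n'.join(g); missing key = KeyError, outside Pre_
    d.modify ("OP" ++ PySem.Int.toStr gi.1) PySem.Dict.empty
      (fun inner => inner.insert "profile_text_low_explain" ("\n" ++ PySem.Str.join "\n" gi.2))

def GroupOperators_alt (profile_sparql : String) (profile_low_explain : String) :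
    List (String × List (String × String)) :=
  let ops1 := (PySem.List.enumerate (pvPartition profile_sparql)).foldl pvStepB1 PySem.Dict.empty
  let ops2 := (PySem.List.enumerate (pvPartition profile_low_explain)).foldl pvStepB2 ops1
  ops2.items.map (fun p => (p.1, p.2.items))

-- ===== PRECONDITION & SPEC =====
-- 'line is an operator line' — the test both Pythons apply to each line
def pvOp (x : String) : Bool :=
  (!(x == "")) && (["time", "fanout", "input", "rows"].all fun w => PySem.Str.isIn w x)

-- Pre_ excludes exactly the inputs where Python A raises KeyError in its second loop: when
-- profile_low_explain has more operator lines than profile_sparql, or needs a preamble group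
-- ("OP0") that profile_sparql's first line (an operator line) never created.
def Pre_GroupOperators (profile_sparql : String) (profile_low_explain : String) : Prop :=
  ((PySem.Str.split? profile_low_explain "\n").getD []).countP pvOp
      ≤ ((PySem.Str.split? profile_sparql "\n").getD []).countP pvOp
  ∧ (pvOp (((PySem.Str.split? profile_low_explain "\n").getD []).headD "") = false
      → pvOp (((PySem.Str.split? profile_sparql "\n").getD []).headD "") = false)

instance (profile_sparql : String) (profile_low_explain : String) : Decidable (Pre_GroupOperators profile_sparql profile_low_explain) := by
  unfold Pre_GroupOperators; infer_instance

def pvWitness_GroupOperators : String × String :=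
  ("head\ntime fanout input rows 1\nbody", "intro\ntime fanout input rows 2")

def Spec_GroupOperators (profile_sparql : String) (profile_low_explain : String) (out : List (String × List (String × String))) : Prop := out = GroupOperators_alt profile_sparql profile_low_explain
instance (profile_sparql : String) (profile_low_explain : String) (out : List (String × List (String × String))) : Decidable (Spec_GroupOperators profile_sparql profile_low_explain out) := by unfold Spec_GroupOperators; infer_instance

-- ===== CLAIM (what is proved, stated in full; the proofs are below) =====
def Claim_equal_GroupOperators : Prop := ∀ (profile_sparql : String) (profile_low_explain : String), Dom_GroupOperators profile_sparql profile_low_explain → Pre_GroupOperators profile_sparql profile_low_explain → Spec_GroupOperators profile_sparql profile_low_explain (GroupOperators profile_sparql profile_low_explain)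

-- ===== LEMMAS AND PROOFS =====

-- ---- str(n) is injective on the nonnegative integers ----
theorem pvToDigitsCore_eq (n : Nat) : ∀ (fuel : Nat) (acc : List Char), n < fuel → 0 < n →
    Nat.toDigitsCore 10 fuel n acc = ((Nat.digits 10 n).map Nat.digitChar).reverse ++ acc := by
  induction n using Nat.strong_induction_on with
  | _ n ih =>
    intro fuel acc hfuel hn
    match fuel, hfuel with
    | f + 1, hfuel =>
      rw [Nat.toDigitsCore]
      by_cases h : n / 10 = 0
      · simp only [h]
        rw [Nat.digits_def' (by norm_num) hn, h]
        simp
      · rw [if_neg h]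
        have hlt : n / 10 < n := Nat.div_lt_self hn (by norm_num)
        rw [ih (n / 10) hlt f _ (by omega) (Nat.pos_of_ne_zero h)]
        rw [Nat.digits_def' (by norm_num) hn]
        simp

theorem pvMap_digitChar_inj : ∀ (l₁ l₂ : List Nat), (∀ x ∈ l₁, x < 10) → (∀ x ∈ l₂, x < 10) →
    l₁.map Nat.digitChar = l₂.map Nat.digitChar → l₁ = l₂ := by
  intro l₁
  induction l₁ with
  | nil => intro l₂ _ _ h; cases l₂ <;> simp_all
  | cons a l ih =>
    intro l₂ h1 h2 h
    cases l₂ with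
    | nil => simp_all
    | cons b m =>
      simp only [List.map_cons, List.cons.injEq] at h
      have hd : a = b := by
        have ha : a < 10 := h1 a (by simp)
        have hb : b < 10 := h2 b (by simp)
        have : ∀ x < 10, ∀ y < 10, Nat.digitChar x = Nat.digitChar y → x = y := by decide
        exact this a ha b hb h.1
      have : l = m := ih m (fun x hx => h1 x (by simp [hx])) (fun x hx => h2 x (by simp [hx])) h.2
      simp [hd, this]

theorem pvToDigits_inj (m n : Nat) (h : Nat.toDigits 10 m = Nat.toDigits 10 n) : m = n := by
  have key : ∀ k : Nat, 0 < k → Nat.toDigits 10 k = ((Nat.digits 10 k).map Nat.digitChar).reverse := by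
    intro k hk
    have := pvToDigitsCore_eq k (k + 1) [] (by omega) hk
    simpa [Nat.toDigits] using this
  have hz : ∀ k : Nat, 0 < k → Nat.toDigits 10 k ≠ ['0'] := by
    intro k hk hbad
    rw [key k hk] at hbad
    have : (Nat.digits 10 k).map Nat.digitChar = ['0'] := by
      have := congrArg List.reverse hbad
      simpa using this
    cases hd : Nat.digits 10 k with
    | nil => simp [hd] at this
    | cons d t =>
      cases t with
      | nil =>
        simp only [hd, List.map_cons, List.map_nil, List.cons.injEq] at this
        have hdlt : d < 10 := Nat.digits_lt_base (by norm_num) (by rw [hd]; simp)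
        have hlast : d ≠ 0 := by
          have h0 := Nat.getLast_digit_ne_zero 10 (m := k) (by omega)
          simpa [hd] using h0
        have : ∀ x < 10, x ≠ 0 → Nat.digitChar x ≠ '0' := by decide
        exact this d hdlt hlast (by simp_all)
      | cons e t' =>
        simp [hd] at this
  rcases Nat.eq_zero_or_pos m with hm | hm <;> rcases Nat.eq_zero_or_pos n with hn | hn
  · omega
  · exact absurd h.symm (by simpa [hm] using hz n hn)
  · exact absurd h (by simpa [hn] using hz m hm)
  · rw [key m hm, key n hn] at h
    have := List.reverse_injective h
    have hdig := pvMap_digitChar_inj _ _ (fun x hx => Nat.digits_lt_base (by norm_num) hx)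
      (fun x hx => Nat.digits_lt_base (by norm_num) hx) this
    calc m = Nat.ofDigits 10 (Nat.digits 10 m) := (Nat.ofDigits_digits 10 m).symm
      _ = Nat.ofDigits 10 (Nat.digits 10 n) := by rw [hdig]
      _ = n := Nat.ofDigits_digits 10 n

-- ---- shared proof-side vocabulary ----
def pvOD : Type := PySem.Dict String (PySem.Dict String String)

def pvMkInner (t lo : String) : PySem.Dict String String :=
  PySem.Dict.ofList [("profile_text", t), ("profile_text_low_explain", lo)]

-- concatenation of lines, each preceded by '\n'
def pvCatNL : List String → String
  | [] => ""
  | x :: g => "\n" ++ x ++ pvCatNL g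

theorem pvJoin_cons (x : String) (g : List String) :
    PySem.Str.join "\n" (x :: g) = x ++ pvCatNL g := by
  induction g generalizing x with
  | nil =>
    show PySem.Str.join "\n" [x] = x ++ pvCatNL []
    simp [PySem.Str.join, PySem.Chars.join_singleton, pvCatNL]
  | cons y g ih =>
    show PySem.Str.join "\n" (x :: y :: g) = x ++ pvCatNL (y :: g)
    have : PySem.Str.join "\n" (x :: y :: g)
        = x ++ "\n" ++ PySem.Str.join "\n" (y :: g) := by
      show String.ofList (PySem.Chars.join "\n".toList (List.map String.toList (x :: y :: g))) = _
      rw [List.map_cons, List.map_cons, PySem.Chars.join_cons_cons, String.ofList_append,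
        String.ofList_append, String.ofList_toList]
      rfl
    rw [this, ih y, pvCatNL, String.append_assoc, String.append_assoc]

-- the consecutive operator groups of a line list (first group starts at the list head)
def pvParts : List String → List (List String)
  | [] => []
  | x :: xs => (x :: xs.takeWhile (fun y => !pvOp y)) :: pvParts (xs.dropWhile (fun y => !pvOp y))
  termination_by L => L.length
  decreasing_by exact Nat.lt_succ_of_le (List.length_dropWhile_le _ _)

-- inner-dict facts on the two literal keys
theorem pvMkInner_insert_pt (t lo v : String) :
    (pvMkInner t lo).insert "profile_text" v = pvMkInner v lo := by
  simp [pvMkInner, PySem.Dict.ofList, PySem.Dict.update, PySem.Dict.insert, PySem.Dict.contains,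
    PySem.Dict.empty]

theorem pvMkInner_getD_pt (t lo : String) :
    (pvMkInner t lo).getD "profile_text" "" = t := by
  simp [pvMkInner, PySem.Dict.ofList, PySem.Dict.update, PySem.Dict.insert, PySem.Dict.contains,
    PySem.Dict.empty, PySem.Dict.getD, PySem.Dict.get?]

theorem pvMkInner_getD_lo (t lo : String) :
    (pvMkInner t lo).getD "profile_text_low_explain" "" = lo := by
  simp [pvMkInner, PySem.Dict.ofList, PySem.Dict.update, PySem.Dict.insert, PySem.Dict.contains,
    PySem.Dict.empty, PySem.Dict.getD, PySem.Dict.get?]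

def pvKc (c : Int) : String := "OP" ++ PySem.Int.toStr c

theorem pvKc_inj {i j : Int} (hi : 0 ≤ i) (hj : 0 ≤ j) (h : pvKc i = pvKc j) : i = j := by
  have h' := congrArg String.toList h
  simp only [pvKc, String.toList_append, PySem.Int.toStr, String.toList_ofList] at h'
  rw [PySem.Int.toChars, PySem.Int.toChars, if_neg (by omega), if_neg (by omega)] at h'
  have : Nat.toDigits 10 i.toNat = Nat.toDigits 10 j.toNat := by
    simpa using h'
  have := pvToDigits_inj _ _ this
  omega

theorem pvKc_ne {i j : Int} (hi : 0 ≤ i) (hj : 0 ≤ j) (h : i ≠ j) : pvKc i ≠ pvKc j :=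
  fun hk => h (pvKc_inj hi hj hk)

-- ---- A's step functions, restated through the proof-side vocabulary (definitional) ----
theorem pvStepA1_eq (s : Int × PySem.Dict String (PySem.Dict String String)) (x : String) :
    pvStepA1 s x =
      (if pvOp x = true then s.1 + 1 else s.1,
       if s.2.contains (pvKc (if pvOp x = true then s.1 + 1 else s.1)) = false
       then s.2.insert (pvKc (if pvOp x = true then s.1 + 1 else s.1)) (pvMkInner x "")
       else s.2.modify (pvKc (if pvOp x = true then s.1 + 1 else s.1)) PySem.Dict.empty
         (fun inner => inner.insert "profile_text" (inner.getD "profile_text" "" ++ "\n" ++ x))) := rfl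

theorem pvStepA2_eq (s : Int × PySem.Dict String (PySem.Dict String String)) (x : String) :
    pvStepA2 s x =
      (if pvOp x = true then s.1 + 1 else s.1,
       s.2.modify (pvKc (if pvOp x = true then s.1 + 1 else s.1)) PySem.Dict.empty
         (fun inner => inner.insert "profile_text_low_explain"
            (inner.getD "profile_text_low_explain" "" ++ "\n" ++ x))) := rfl

theorem pvPartStep_eq (s : List (List String) × List String) (line : String) :
    pvPartStep s line =
      if pvOp line = true then (s.1 ++ [s.2], [line]) else (s.1, s.2 ++ [line]) := rfl

theorem pvModify_eq {ν : Type} [BEq String] (d : PySem.Dict String ν) (k : String) (dflt : ν)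
    (f : ν → ν) : d.modify k dflt f = d.insert k (f (d.getD k dflt)) := rfl

-- ---- B's grouped inserts / assignments, in recursive form ----
def pvInsFrom : PySem.Dict String (PySem.Dict String String) → Int → List (List String) →
    PySem.Dict String (PySem.Dict String String)
  | d, _, [] => d
  | d, c, g :: gs =>
      pvInsFrom (d.insert (pvKc (c + 1)) (pvMkInner (PySem.Str.join "\n" g) "")) (c + 1) gs

def pvIns2From : PySem.Dict String (PySem.Dict String String) → Int → List (List String) →
    PySem.Dict String (PySem.Dict String String)
  | d, _, [] => d
  | d, c, g :: gs =>
      pvIns2From (d.modify (pvKc (c + 1)) PySem.Dict.empty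
        (fun inner => inner.insert "profile_text_low_explain" ("\n" ++ PySem.Str.join "\n" g)))
        (c + 1) gs

-- ---- A's per-line mutations of the current group's entry ----
def pvApp1 (c : Int) (d : PySem.Dict String (PySem.Dict String String)) (g : List String) :
    PySem.Dict String (PySem.Dict String String) :=
  g.foldl (fun d x => d.modify (pvKc c) PySem.Dict.empty
    (fun inner => inner.insert "profile_text" (inner.getD "profile_text" "" ++ "\n" ++ x))) d

def pvApp2 (c : Int) (d : PySem.Dict String (PySem.Dict String String)) (g : List String) :
    PySem.Dict String (PySem.Dict String String) :=
  g.foldl (fun d x => d.modify (pvKc c) PySem.Dict.empty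
    (fun inner => inner.insert "profile_text_low_explain"
       (inner.getD "profile_text_low_explain" "" ++ "\n" ++ x))) d

theorem pvApp1_insert (g : List String) : ∀ (d : PySem.Dict String (PySem.Dict String String))
    (c : Int) (s : String),
    pvApp1 c (d.insert (pvKc c) (pvMkInner s "")) g
      = d.insert (pvKc c) (pvMkInner (s ++ pvCatNL g) "") := by
  induction g with
  | nil => intro d c s; simp [pvApp1, pvCatNL]
  | cons x g ih =>
    intro d c s
    show pvApp1 c ((d.insert (pvKc c) (pvMkInner s "")).modify (pvKc c) PySem.Dict.empty _) g = _
    rw [pvModify_eq, PySem.Dict.getD_insert_self, PySem.Dict.insert_insert_self,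
      pvMkInner_getD_pt, pvMkInner_insert_pt, ih, pvCatNL]
    simp [String.append_assoc]

theorem pvApp2_insert (g : List String) : ∀ (d : PySem.Dict String (PySem.Dict String String))
    (c : Int) (w : PySem.Dict String String) (s : String),
    pvApp2 c (d.insert (pvKc c) (w.insert "profile_text_low_explain" s)) g
      = d.insert (pvKc c) (w.insert "profile_text_low_explain" (s ++ pvCatNL g)) := by
  induction g with
  | nil => intro d c w s; simp [pvApp2, pvCatNL]
  | cons x g ih =>
    intro d c w s
    show pvApp2 c ((d.insert (pvKc c) (w.insert "profile_text_low_explain" s)).modify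
      (pvKc c) PySem.Dict.empty _) g = _
    rw [pvModify_eq, PySem.Dict.getD_insert_self, PySem.Dict.insert_insert_self,
      PySem.Dict.getD_insert_self, PySem.Dict.insert_insert_self, ih, pvCatNL]
    simp [String.append_assoc]

-- ---- main invariant lemma, phase 1 ----
theorem pvMain1 (L : List String) : ∀ (c : Int) (d : PySem.Dict String (PySem.Dict String String)),
    0 ≤ c → d.contains (pvKc c) = true → (∀ j : Int, c < j → d.contains (pvKc j) = false) →
    (L.foldl pvStepA1 (c, d)).2
      = pvInsFrom (pvApp1 c d (L.takeWhile (fun y => !pvOp y))) c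
          (pvParts (L.dropWhile (fun y => !pvOp y))) := by
  induction L with
  | nil => intro c d _ _ _; simp [pvInsFrom, pvApp1, pvParts]
  | cons x xs ih =>
    intro c d hc hcon hj
    rw [List.foldl_cons, pvStepA1_eq]
    by_cases hx : pvOp x = true
    · -- operator line: a fresh key OP(c+1) is inserted
      have hfresh : d.contains (pvKc (c + 1)) = false := hj (c + 1) (by omega)
      simp only [hx, if_true]
      rw [if_pos hfresh]
      have hcon' : (d.insert (pvKc (c + 1)) (pvMkInner x "")).contains (pvKc (c + 1)) = true :=
        PySem.Dict.contains_insert_self _ _ _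
      have hj' : ∀ j : Int, c + 1 < j →
          (d.insert (pvKc (c + 1)) (pvMkInner x "")).contains (pvKc j) = false := by
        intro j hjlt
        rw [PySem.Dict.contains_insert]
        rw [beq_eq_false_iff_ne.mpr (pvKc_ne (by omega) (by omega) (by omega)),
          hj j (by omega)]
        rfl
      rw [ih (c + 1) _ (by omega) hcon' hj']
      rw [List.takeWhile_cons, List.dropWhile_cons]
      simp only [hx, Bool.not_true, Bool.false_eq_true, if_false]
      show _ = pvInsFrom (pvApp1 c d []) c (pvParts (x :: xs))
      rw [pvParts]
      show pvInsFrom (pvApp1 (c + 1) (d.insert (pvKc (c + 1)) (pvMkInner x "")) _) (c + 1) _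
        = pvInsFrom ((pvApp1 c d []).insert (pvKc (c + 1))
            (pvMkInner (PySem.Str.join "\n" (x :: List.takeWhile (fun y => !pvOp y) xs)) "")) (c + 1) _
      rw [pvApp1_insert, pvJoin_cons]
      show _ = pvInsFrom (pvApp1 c d [] |>.insert _ _) _ _
      simp [pvApp1]
    · -- non-operator line: the current entry's profile_text is extended
      have hx' : pvOp x = false := by simpa using hx
      simp only [hx', Bool.false_eq_true, if_false]
      rw [if_neg (by simp [hcon])]
      have hcon' : (d.modify (pvKc c) PySem.Dict.empty
          (fun inner => inner.insert "profile_text" (inner.getD "profile_text" "" ++ "\n" ++ x))).contains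
            (pvKc c) = true := by
        rw [PySem.Dict.contains_modify]; simp
      have hj' : ∀ j : Int, c < j → (d.modify (pvKc c) PySem.Dict.empty
          (fun inner => inner.insert "profile_text" (inner.getD "profile_text" "" ++ "\n" ++ x))).contains
            (pvKc j) = false := by
        intro j hjlt
        rw [PySem.Dict.contains_modify,
          beq_eq_false_iff_ne.mpr (pvKc_ne (by omega) (by omega) (by omega)), hj j hjlt]
        rfl
      rw [ih c _ hc hcon' hj']
      rw [List.takeWhile_cons, List.dropWhile_cons]
      simp only [hx', Bool.not_false, if_true]
      rfl

-- ---- main invariant lemma, phase 2 ----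
theorem pvMain2 (L : List String) : ∀ (c : Int) (d : PySem.Dict String (PySem.Dict String String)),
    0 ≤ c →
    (∀ j : Int, c < j →
      ((d.getD (pvKc j) PySem.Dict.empty).getD "profile_text_low_explain" "") = "") →
    (L.foldl pvStepA2 (c, d)).2
      = pvIns2From (pvApp2 c d (L.takeWhile (fun y => !pvOp y))) c
          (pvParts (L.dropWhile (fun y => !pvOp y))) := by
  induction L with
  | nil => intro c d _ _; simp [pvIns2From, pvApp2, pvParts]
  | cons x xs ih =>
    intro c d hc hlo
    rw [List.foldl_cons, pvStepA2_eq]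
    by_cases hx : pvOp x = true
    · -- operator line: the next entry's (empty) low-explain field starts accumulating
      simp only [hx, if_true]
      have hblank : (d.getD (pvKc (c + 1)) PySem.Dict.empty).getD "profile_text_low_explain" ""
          = "" := hlo (c + 1) (by omega)
      have hd1 : d.modify (pvKc (c + 1)) PySem.Dict.empty
            (fun inner => inner.insert "profile_text_low_explain"
              (inner.getD "profile_text_low_explain" "" ++ "\n" ++ x))
          = d.insert (pvKc (c + 1)) ((d.getD (pvKc (c + 1)) PySem.Dict.empty).insert
              "profile_text_low_explain" ("\n" ++ x)) := by
        rw [pvModify_eq, hblank, String.empty_append]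
      rw [hd1]
      have hlo' : ∀ j : Int, c + 1 < j →
          (((d.insert (pvKc (c + 1)) ((d.getD (pvKc (c + 1)) PySem.Dict.empty).insert
              "profile_text_low_explain" ("\n" ++ x))).getD (pvKc j)
                PySem.Dict.empty).getD "profile_text_low_explain" "") = "" := by
        intro j hjlt
        rw [PySem.Dict.getD_insert_of_ne _ _ _ (pvKc_ne (by omega) (by omega) (by omega))]
        exact hlo j (by omega)
      rw [ih (c + 1) _ (by omega) hlo']
      rw [List.takeWhile_cons, List.dropWhile_cons]
      simp only [hx, Bool.not_true, Bool.false_eq_true, if_false]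
      rw [pvApp2_insert]
      show _ = pvIns2From (pvApp2 c d []) c (pvParts (x :: xs))
      rw [pvParts]
      show _ = pvIns2From ((pvApp2 c d []).modify (pvKc (c + 1)) PySem.Dict.empty
        (fun inner => inner.insert "profile_text_low_explain"
          ("\n" ++ PySem.Str.join "\n" (x :: List.takeWhile (fun y => !pvOp y) xs)))) (c + 1) _
      have happ0 : pvApp2 c d [] = d := rfl
      rw [happ0, pvModify_eq, pvJoin_cons]
      simp [String.append_assoc]
    · -- non-operator line: the current entry's low-explain field is extended on both sides
      have hx' : pvOp x = false := by simpa using hx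
      simp only [hx', Bool.false_eq_true, if_false]
      have hlo' : ∀ j : Int, c < j →
          (((d.modify (pvKc c) PySem.Dict.empty
            (fun inner => inner.insert "profile_text_low_explain"
              (inner.getD "profile_text_low_explain" "" ++ "\n" ++ x))).getD (pvKc j)
                PySem.Dict.empty).getD "profile_text_low_explain" "") = "" := by
        intro j hjlt
        rw [pvModify_eq,
          PySem.Dict.getD_insert_of_ne _ _ _ (pvKc_ne (by omega) (by omega) (by omega))]
        exact hlo j hjlt
      rw [ih c _ hc hlo']
      rw [List.takeWhile_cons, List.dropWhile_cons]
      simp only [hx', Bool.not_false, if_true]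
      rfl

-- ---- B's partition in recursive form ----
theorem pvPartitionAux (L : List String) : ∀ (gs : List (List String)) (cur : List String),
    (L.foldl pvPartStep (gs, cur)).1 ++ [(L.foldl pvPartStep (gs, cur)).2]
      = gs ++ (cur ++ L.takeWhile (fun y => !pvOp y))
          :: pvParts (L.dropWhile (fun y => !pvOp y)) := by
  induction L with
  | nil => intro gs cur; simp [pvParts]
  | cons x xs ih =>
    intro gs cur
    rw [List.foldl_cons, pvPartStep_eq]
    by_cases hx : pvOp x = true
    · simp only [hx, if_true]
      rw [ih (gs ++ [cur]) [x]]
      rw [List.takeWhile_cons, List.dropWhile_cons]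
      simp only [hx, Bool.not_true, Bool.false_eq_true, if_false]
      rw [pvParts]
      simp
    · have hx' : pvOp x = false := by simpa using hx
      simp only [hx', Bool.false_eq_true, if_false]
      rw [ih gs (cur ++ [x])]
      rw [List.takeWhile_cons, List.dropWhile_cons]
      simp only [hx', Bool.not_false, if_true]
      simp


theorem pvPartition_eq (t : String) :
    pvPartition t
      = (((PySem.Str.split? t "\n").getD []).takeWhile (fun y => !pvOp y))
          :: pvParts (((PySem.Str.split? t "\n").getD []).dropWhile (fun y => !pvOp y)) := by
  have := pvPartitionAux ((PySem.Str.split? t "\n").getD []) [] []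
  simpa [pvPartition] using this

-- ---- B's folds over the indexed tail groups ----
theorem pvB1_tail (gs : List (List String)) : ∀ (n : Int), 0 ≤ n →
    ∀ (d : PySem.Dict String (PySem.Dict String String)),
    (PySem.List.enumerate gs (n + 1)).foldl pvStepB1 d = pvInsFrom d n gs := by
  induction gs with
  | nil => intro n _ d; simp [pvInsFrom, PySem.List.enumerate]
  | cons g gs ih =>
    intro n hn d
    rw [PySem.List.enumerate_cons, List.foldl_cons]
    rw [ih (n + 1) (by omega)]
    have hstep : pvStepB1 d (n + 1, g)
        = d.insert (pvKc (n + 1)) (pvMkInner (PySem.Str.join "\n" g) "") := by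
      rw [pvStepB1, if_neg (by rintro ⟨h1, -⟩; omega)]
      rfl
    rw [hstep]
    rfl


theorem pvB2_tail (gs : List (List String)) : ∀ (n : Int), 0 ≤ n →
    ∀ (d : PySem.Dict String (PySem.Dict String String)),
    (PySem.List.enumerate gs (n + 1)).foldl pvStepB2 d = pvIns2From d n gs := by
  induction gs with
  | nil => intro n _ d; simp [pvIns2From, PySem.List.enumerate]
  | cons g gs ih =>
    intro n hn d
    rw [PySem.List.enumerate_cons, List.foldl_cons]
    rw [ih (n + 1) (by omega)]
    have hstep : pvStepB2 d (n + 1, g)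
        = d.modify (pvKc (n + 1)) PySem.Dict.empty
            (fun inner => inner.insert "profile_text_low_explain" ("\n" ++ PySem.Str.join "\n" g)) := by
      rw [pvStepB2, if_neg (by rintro ⟨h1, -⟩; omega)]
      rfl
    rw [hstep]
    rfl


-- ---- phase 1: A's fold equals B's fold ----
theorem pvPhase1 (L : List String) :
    (L.foldl pvStepA1 ((0 : Int), PySem.Dict.empty)).2
      = (PySem.List.enumerate
          ((L.takeWhile (fun y => !pvOp y)) :: pvParts (L.dropWhile (fun y => !pvOp y)))).foldl
          pvStepB1 PySem.Dict.empty := by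
  cases L with
  | nil => simp [pvParts, pvStepB1, PySem.List.enumerate]
  | cons x xs =>
    rw [List.foldl_cons, pvStepA1_eq, PySem.List.enumerate_cons, List.foldl_cons]
    by_cases hx : pvOp x = true
    · simp only [hx, if_true]
      rw [List.takeWhile_cons, List.dropWhile_cons]
      simp only [hx, Bool.not_true, Bool.false_eq_true, if_false]
      rw [if_pos (PySem.Dict.contains_empty _)]
      rw [pvMain1 xs (0 + 1) _ (by omega) (PySem.Dict.contains_insert_self _ _ _) ?hj]
      case hj =>
        intro j hjlt
        rw [PySem.Dict.contains_insert,
          beq_eq_false_iff_ne.mpr (pvKc_ne (by omega) (by omega) (by omega)),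
          PySem.Dict.contains_empty]
        rfl
      rw [pvApp1_insert]
      have hskip : pvStepB1 PySem.Dict.empty ((0 : Int), []) = PySem.Dict.empty := by
        simp [pvStepB1]
      rw [hskip, pvParts, PySem.List.enumerate_cons, List.foldl_cons]
      have hstep : pvStepB1 PySem.Dict.empty ((0 : Int) + 1, x :: List.takeWhile (fun y => !pvOp y) xs)
          = PySem.Dict.empty.insert (pvKc (0 + 1))
              (pvMkInner (PySem.Str.join "\n" (x :: List.takeWhile (fun y => !pvOp y) xs)) "") := by
        rw [pvStepB1, if_neg (by rintro ⟨h1, -⟩; omega)]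
        rfl
      rw [hstep, pvB1_tail _ (0 + 1) (by omega), pvJoin_cons]
    · have hx' : pvOp x = false := by simpa using hx
      simp only [hx', Bool.false_eq_true, if_false]
      rw [List.takeWhile_cons, List.dropWhile_cons]
      simp only [hx', Bool.not_false, if_true]
      rw [if_pos (PySem.Dict.contains_empty _)]
      rw [pvMain1 xs 0 _ (by omega) (PySem.Dict.contains_insert_self _ _ _) ?hj2]
      case hj2 =>
        intro j hjlt
        rw [PySem.Dict.contains_insert,
          beq_eq_false_iff_ne.mpr (pvKc_ne (by omega) (by omega) (by omega)),
          PySem.Dict.contains_empty]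
        rfl
      rw [pvApp1_insert]
      have hstep : pvStepB1 PySem.Dict.empty ((0 : Int), x :: List.takeWhile (fun y => !pvOp y) xs)
          = PySem.Dict.empty.insert (pvKc 0)
              (pvMkInner (PySem.Str.join "\n" (x :: List.takeWhile (fun y => !pvOp y) xs)) "") := by
        rw [pvStepB1, if_neg (by rintro ⟨-, h2⟩; simp at h2)]
        rfl
      rw [hstep, pvB1_tail _ 0 (by omega), pvJoin_cons]


-- every value of B's phase-1 result has an empty 'profile_text_low_explain' field
theorem pvLoB1 (gs : List (List String)) : ∀ (k0 : Int)
    (d : PySem.Dict String (PySem.Dict String String)),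
    (∀ k : String, (d.getD k PySem.Dict.empty).getD "profile_text_low_explain" "" = "") →
    ∀ k : String,
      (((PySem.List.enumerate gs k0).foldl pvStepB1 d).getD k
          PySem.Dict.empty).getD "profile_text_low_explain" ""
        = "" := by
  induction gs with
  | nil => intro k0 d h k; simpa [PySem.List.enumerate] using h k
  | cons g gs ih =>
    intro k0 d h k
    rw [PySem.List.enumerate_cons, List.foldl_cons]
    apply ih
    intro k'
    by_cases hs : k0 = 0 ∧ g = []
    · rw [pvStepB1, if_pos hs]; exact h k'
    · rw [pvStepB1, if_neg hs]
      rw [PySem.Dict.getD_insert]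
      split
      · show (pvMkInner (PySem.Str.join "\n" g) "").getD "profile_text_low_explain" "" = ""
        exact pvMkInner_getD_lo _ _
      · exact h k'


-- ---- phase 2: A's fold equals B's fold, from any start with blank low-explain fields ----
theorem pvPhase2 (L : List String) (d0 : PySem.Dict String (PySem.Dict String String))
    (h : ∀ k : String, (d0.getD k PySem.Dict.empty).getD "profile_text_low_explain" "" = "") :
    (L.foldl pvStepA2 ((0 : Int), d0)).2
      = (PySem.List.enumerate
          ((L.takeWhile (fun y => !pvOp y)) :: pvParts (L.dropWhile (fun y => !pvOp y)))).foldl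
          pvStepB2 d0 := by
  rw [PySem.List.enumerate_cons, List.foldl_cons]
  rw [pvMain2 L 0 d0 (by omega) (fun j _ => h (pvKc j))]
  rw [pvB2_tail _ 0 (by omega)]
  congr 1
  cases hT : L.takeWhile (fun y => !pvOp y) with
  | nil => simp [pvApp2, pvStepB2]
  | cons x tw =>
    have hstep : pvStepB2 d0 ((0 : Int), x :: tw)
        = d0.insert (pvKc 0) ((d0.getD (pvKc 0) PySem.Dict.empty).insert
            "profile_text_low_explain" ("\n" ++ PySem.Str.join "\n" (x :: tw))) := by
      rw [pvStepB2, if_neg (by rintro ⟨-, h2⟩; simp at h2)]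
      rfl
    rw [hstep]
    have hfirst : pvApp2 0 d0 (x :: tw)
        = pvApp2 0 (d0.insert (pvKc 0) ((d0.getD (pvKc 0) PySem.Dict.empty).insert
            "profile_text_low_explain" ("\n" ++ x))) tw := by
      show pvApp2 0 (d0.modify (pvKc 0) PySem.Dict.empty _) tw = _
      rw [pvModify_eq, h (pvKc 0), String.empty_append]
    rw [hfirst, pvApp2_insert, pvJoin_cons]
    simp [String.append_assoc]


-- ---- the two ports agree on every input ----
theorem pvEquiv (ps pl : String) : GroupOperators ps pl = GroupOperators_alt ps pl := by
  simp only [GroupOperators, GroupOperators_alt]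
  rw [PySem.List.foldl_pyRange_zero_pyGetD ((PySem.Str.split? ps "\n").getD []) ""
      pvStepA1 ((0 : Int), PySem.Dict.empty),
    PySem.List.foldl_pyRange_zero_pyGetD ((PySem.Str.split? pl "\n").getD []) "" pvStepA2 _]
  rw [pvPartition_eq, pvPartition_eq]
  rw [pvPhase1]
  rw [pvPhase2 _ _ ?hblank]
  case hblank =>
    apply pvLoB1
    intro k
    rw [PySem.Dict.getD_empty, PySem.Dict.getD_empty]


-- ===== VERDICT (by name: the statement is the Claim_ definition above) =====
theorem GroupOperators_spec : Claim_equal_GroupOperators := by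
  intro profile_sparql profile_low_explain _ _
  unfold Spec_GroupOperators
  exact pvEquiv profile_sparql profile_low_explain
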